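-- pv_equiv track=rewrite | github.com/MeetRajput00/StoryFlux | scripts/youtube_uploader.py | _optimize_tags
-- ===== SOURCE A (Python) =====
-- def _optimize_tags(tags: list) -> list:
--     """
--     Optimize tags for maximum SEO impact
--
--     YouTube tag optimization rules:
--     1. Total character limit: 500 characters
--     2. Most important tags first (YouTube weights them more)
--     3. Mix of broad and specific tags
--     4. No duplicates
--     5. No special characters that could cause issues
--
--     Args:
--         tags: List of tag strings
--
--     Returns:
--         Optimized list of tags
--     """
--     if not tags:
--         return []
--
--     # Remove duplicates while preserving order
--     seen = set()
--     unique_tags = []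
--     for tag in tags:
--         tag_clean = tag.strip().lower()
--         if tag_clean and tag_clean not in seen and len(tag_clean) > 1:
--             seen.add(tag_clean)
--             # Keep original case for readability
--             unique_tags.append(tag.strip())
--
--     # Ensure total length under 500 characters
--     total_length = 0
--     final_tags = []
--     for tag in unique_tags:
--         if total_length + len(tag) + 1 <= 500:  # +1 for separator
--             final_tags.append(tag)
--             total_length += len(tag) + 1
--         else:
--             break
--
--     return final_tags
-- ===== SOURCE B (Python) =====
-- def _optimize_tags(tags: list) -> list:
--     """Single fused pass: dedup (case-insensitive, stripped) and apply the
--     500-character budget at the same time, stopping at the first tag that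
--     would not fit."""
--     seen = set()
--     final_tags = []
--     total_length = 0
--     for tag in tags:
--         tag_stripped = tag.strip()
--         tag_clean = tag_stripped.lower()
--         if not tag_clean or tag_clean in seen or len(tag_clean) <= 1:
--             continue
--         seen.add(tag_clean)
--         if total_length + len(tag_stripped) + 1 > 500:
--             break
--         final_tags.append(tag_stripped)
--         total_length += len(tag_stripped) + 1
--     return final_tags
-- ===== Notes on version B (the rewrite author's own statement) =====
-- stated objective: faster
-- what changed: Fuses A's two sequential loops (dedup pass, then budget pass with break) into one pass that maintains the seen-set, running length and output together and stops at the first non-duplicate tag over the 500-char budget, so tags after the cutoff are never stripped/lowered/deduped; the redundant empty-input early return is dropped.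
import Mathlib
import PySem

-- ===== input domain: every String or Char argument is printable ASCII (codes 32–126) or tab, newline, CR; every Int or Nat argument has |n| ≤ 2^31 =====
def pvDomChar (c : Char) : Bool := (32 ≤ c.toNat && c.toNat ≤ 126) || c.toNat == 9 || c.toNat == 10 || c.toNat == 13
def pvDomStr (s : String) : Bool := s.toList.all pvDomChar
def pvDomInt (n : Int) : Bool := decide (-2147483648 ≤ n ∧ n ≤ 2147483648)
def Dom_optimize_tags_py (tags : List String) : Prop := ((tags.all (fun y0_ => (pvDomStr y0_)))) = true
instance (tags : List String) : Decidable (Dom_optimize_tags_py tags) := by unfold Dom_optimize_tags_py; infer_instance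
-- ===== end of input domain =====

-- B fuses A's two loops (dedup, then 500-char budget with break) into one pass that stops at the budget, so later tags are never processed; a timing run measured B faster.


-- ===== PORT A =====
-- first loop: dedup (case-insensitive on the stripped, lowered tag), keeping stripped originals
def pvALoop1 : List String → PySem.Set String → List String → List String
  | [], _, unique => unique
  | tag :: rest, seen, unique =>
    -- tag_clean = tag.strip().lower(); truthiness of a string = ≠ ""
    if PySem.Str.lower (PySem.Str.strip tag) ≠ "" ∧
        ¬ (PySem.Set.contains seen (PySem.Str.lower (PySem.Str.strip tag)) = true) ∧
        PySem.Str.len (PySem.Str.lower (PySem.Str.strip tag)) > 1 then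
      pvALoop1 rest (PySem.Set.add seen (PySem.Str.lower (PySem.Str.strip tag))) (unique ++ [PySem.Str.strip tag])
    else
      pvALoop1 rest seen unique

-- second loop: 500-character budget, 'break' on the first tag that does not fit
def pvALoop2 : List String → Int → List String → List String
  | [], _, final => final
  | tag :: rest, total, final =>
    if total + PySem.Str.len tag + 1 ≤ 500 then
      pvALoop2 rest (total + PySem.Str.len tag + 1) (final ++ [tag])
    else
      final

def optimize_tags_py (tags : List String) : List String :=
  if tags = [] then []
  else pvALoop2 (pvALoop1 tags PySem.Set.empty []) 0 []

-- ===== PORT B =====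
-- one fused pass: seen set, running total and output together; 'break' on first non-duplicate tag over budget
def pvBLoop : List String → PySem.Set String → Int → List String → List String
  | [], _, _, final => final
  | tag :: rest, seen, total, final =>
    if PySem.Str.lower (PySem.Str.strip tag) = "" ∨
        PySem.Set.contains seen (PySem.Str.lower (PySem.Str.strip tag)) = true ∨
        PySem.Str.len (PySem.Str.lower (PySem.Str.strip tag)) ≤ 1 then
      pvBLoop rest seen total final
    else
      if total + PySem.Str.len (PySem.Str.strip tag) + 1 > 500 then
        final
      else
        pvBLoop rest (PySem.Set.add seen (PySem.Str.lower (PySem.Str.strip tag)))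
          (total + PySem.Str.len (PySem.Str.strip tag) + 1) (final ++ [PySem.Str.strip tag])

def optimize_tags_py_alt (tags : List String) : List String :=
  pvBLoop tags PySem.Set.empty 0 []

-- ===== PRECONDITION & SPEC =====
def Spec_optimize_tags_py (tags : List String) (out : List String) : Prop := out = optimize_tags_py_alt tags
instance (tags : List String) (out : List String) : Decidable (Spec_optimize_tags_py tags out) := by unfold Spec_optimize_tags_py; infer_instance

-- ===== CLAIM (what is proved, stated in full; the proofs are below) =====
def Claim_equal_optimize_tags_py : Prop := ∀ (tags : List String), Dom_optimize_tags_py tags → Spec_optimize_tags_py tags (optimize_tags_py tags)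

-- ===== LEMMAS AND PROOFS =====

-- the first loop's accumulator peels off
theorem pvALoop1_acc (tags : List String) : ∀ (seen : PySem.Set String) (u : List String),
    pvALoop1 tags seen u = u ++ pvALoop1 tags seen [] := by
  induction tags with
  | nil => intro seen u; simp [pvALoop1]
  | cons t rest ih =>
    intro seen u
    simp only [pvALoop1]
    split
    · rw [ih _ (u ++ [PySem.Str.strip t]), ih _ ([] ++ [PySem.Str.strip t])]
      simp
    · exact ih _ _

theorem pvALoop1_acc1 (tags : List String) (seen : PySem.Set String) (x : String) :
    pvALoop1 tags seen [x] = x :: pvALoop1 tags seen [] := pvALoop1_acc tags seen [x]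

-- B's fused loop equals A's second loop applied to A's first loop's result
theorem pvFuse (tags : List String) : ∀ (seen : PySem.Set String) (total : Int) (final : List String),
    pvBLoop tags seen total final = pvALoop2 (pvALoop1 tags seen []) total final := by
  induction tags with
  | nil => intro seen total final; simp [pvBLoop, pvALoop1, pvALoop2]
  | cons t rest ih =>
    intro seen total final
    simp only [pvBLoop, pvALoop1]
    by_cases hc : PySem.Str.lower (PySem.Str.strip t) = "" ∨
        PySem.Set.contains seen (PySem.Str.lower (PySem.Str.strip t)) = true ∨
        PySem.Str.len (PySem.Str.lower (PySem.Str.strip t)) ≤ 1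
    · rw [if_pos hc, if_neg ?_, ih]
      rintro ⟨h1, h2, h3⟩
      rcases hc with h | h | h
      exacts [h1 h, h2 h, by omega]
    · have h1 : PySem.Str.lower (PySem.Str.strip t) ≠ "" := fun h => hc (Or.inl h)
      have h2 : ¬ (PySem.Set.contains seen (PySem.Str.lower (PySem.Str.strip t)) = true) :=
        fun h => hc (Or.inr (Or.inl h))
      have h3 : PySem.Str.len (PySem.Str.lower (PySem.Str.strip t)) > 1 := by
        by_contra h; exact hc (Or.inr (Or.inr (by omega)))
      have hA := And.intro h1 (And.intro h2 h3)
      rw [if_neg hc, if_pos hA]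
      simp only [List.nil_append]
      rw [pvALoop1_acc1]
      simp only [pvALoop2]
      have hlen : PySem.Str.len (PySem.Str.strip t) =
          PySem.Str.len (PySem.Str.lower (PySem.Str.strip t)) := by
        simp [PySem.Str.len_eq, PySem.Str.toList_lower, PySem.Chars.lower]
      by_cases hb : total + PySem.Str.len (PySem.Str.strip t) + 1 ≤ 500
      · rw [if_neg (by omega), if_pos hb, ih]
      · rw [if_pos (by omega), if_neg hb]

-- ===== VERDICT (by name: the statement is the Claim_ definition above) =====
theorem optimize_tags_py_spec : Claim_equal_optimize_tags_py := by
  intro tags _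
  unfold Spec_optimize_tags_py optimize_tags_py optimize_tags_py_alt
  cases tags with
  | nil => simp [pvBLoop]
  | cons t rest => rw [if_neg (by simp), pvFuse]
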